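-- pv_equiv track=rewrite | github.com/LikeBear95/Algorithm | 프로그래머스/1/42840. 모의고사/모의고사.py | solution
-- ===== SOURCE A (Python) =====
-- def solution(answers):
--     answer = []
--     tmp = [0,0,0]
--     two = [1,3,4,5]
--     three = [3,1,2,4,5]
--     for i, n in enumerate(answers):
--         if n == i % 5 + 1:
--             tmp[0] += 1
--         if i % 2 == 0 and n == 2:
--             tmp[1] += 1
--         elif i % 2 and two[(i % 8) // 2] == n:
--             tmp[1] += 1
--         if n == three[(i % 10) // 2]:
--             tmp[2] += 1
--     for i, num in enumerate(tmp):
--         if num == max(tmp):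
--             answer.append(i+1)
--     return answer
-- ===== SOURCE B (Python) =====
-- def solution(answers):
--     patterns = [[1, 2, 3, 4, 5],
--                 [2, 1, 2, 3, 2, 4, 2, 5],
--                 [3, 3, 1, 1, 2, 2, 4, 4, 5, 5]]
--     counts = [sum(1 for i, n in enumerate(answers) if p[i % len(p)] == n)
--               for p in patterns]
--     m = max(counts)
--     return [i + 1 for i in range(3) if counts[i] == m]
-- ===== Notes on version B (the rewrite author's own statement) =====
-- stated objective: idiomatic
-- what changed: B replaces A's hand-coded modular-arithmetic branches (i%5+1, parity split with two[(i%8)//2], three[(i%10)//2]) by three explicit cyclic pattern lists matched via p[i % len(p)], counting each supervisor with a separate comprehension instead of one loop mutating a tmp triple.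
import Mathlib
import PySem

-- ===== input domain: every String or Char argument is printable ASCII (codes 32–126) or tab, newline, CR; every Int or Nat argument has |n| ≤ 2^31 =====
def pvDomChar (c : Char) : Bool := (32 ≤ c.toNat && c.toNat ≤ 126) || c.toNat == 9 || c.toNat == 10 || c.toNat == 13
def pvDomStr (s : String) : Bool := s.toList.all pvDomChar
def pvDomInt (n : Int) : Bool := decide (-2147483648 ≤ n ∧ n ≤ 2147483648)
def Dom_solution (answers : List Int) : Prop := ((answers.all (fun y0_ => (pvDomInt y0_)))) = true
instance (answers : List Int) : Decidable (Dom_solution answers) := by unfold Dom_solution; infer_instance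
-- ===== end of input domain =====

-- B matches each index against three explicit cyclic pattern lists instead of A's
-- hand-coded modular-arithmetic branches; same O(n) cost, more idiomatic.

-- ===== PORT A =====
def twoA : List Int := [1, 3, 4, 5]
def threeA : List Int := [3, 1, 2, 4, 5]

-- list indexing two[(i%8)//2] / three[(i%10)//2] is ported with pyGetD; the index is
-- always in range (0 ≤ (i%8)//2 < 4, 0 ≤ (i%10)//2 < 5), so this is exact.
def solution (answers : List Int) : List Int :=
  let tmp := (PySem.List.enumerate answers).foldl
    (fun (t : Int × Int × Int) (p : Int × Int) =>
      let i := p.1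
      let n := p.2
      let t0 := if n = PySem.Int.mod i 5 + 1 then t.1 + 1 else t.1
      let t1 :=
        if PySem.Int.mod i 2 = 0 ∧ n = 2 then t.2.1 + 1
        else if PySem.Int.mod i 2 ≠ 0 ∧
                PySem.List.pyGetD twoA (PySem.Int.floordiv (PySem.Int.mod i 8) 2) 0 = n
             then t.2.1 + 1 else t.2.1
      let t2 :=
        if n = PySem.List.pyGetD threeA (PySem.Int.floordiv (PySem.Int.mod i 10) 2) 0
        then t.2.2 + 1 else t.2.2
      (t0, t1, t2)) (0, 0, 0)
  let tmpL : List Int := [tmp.1, tmp.2.1, tmp.2.2]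
  match PySem.List.max? tmpL (fun x => x) with
  | some m =>
      (PySem.List.enumerate tmpL).foldl
        (fun acc p => if p.2 = m then acc ++ [p.1 + 1] else acc) []
  | none => []   -- unreachable: tmpL has three elements (max(tmp) would raise only on [])

-- ===== PORT B =====
def pvPatterns : List (List Int) := [[1, 2, 3, 4, 5],
                                     [2, 1, 2, 3, 2, 4, 2, 5],
                                     [3, 3, 1, 1, 2, 2, 4, 4, 5, 5]]

-- p[i % len(p)]: always in range for nonempty p, so pyGetD is exact here
def pvCount (p : List Int) (answers : List Int) : Int :=
  (PySem.List.enumerate answers).foldl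
    (fun c q => if PySem.List.pyGetD p (PySem.Int.mod q.1 (PySem.List.len p)) 0 = q.2
                then c + 1 else c) 0

def solution_alt (answers : List Int) : List Int :=
  let counts := pvPatterns.map (fun p => pvCount p answers)
  match PySem.List.max? counts (fun x => x) with
  | some m =>
      (List.range 3).foldl
        (fun acc i => if counts.getD i 0 = m then acc ++ [(i : Int) + 1] else acc) []
  | none => []   -- unreachable: counts has three elements

-- ===== PRECONDITION & SPEC =====
def Spec_solution (answers : List Int) (out : List Int) : Prop := out = solution_alt answers
instance (answers : List Int) (out : List Int) : Decidable (Spec_solution answers out) := by unfold Spec_solution; infer_instance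

-- ===== CLAIM (what is proved, stated in full; the proofs are below) =====
def Claim_equal_solution : Prop := ∀ (answers : List Int), Dom_solution answers → Spec_solution answers (solution answers)

-- ===== LEMMAS AND PROOFS =====

-- pointwise: A's pattern-1 test equals B's table lookup
theorem cond1 (i n : Int) :
    (PySem.List.pyGetD [1, 2, 3, 4, 5] (PySem.Int.mod i 5) 0 = n) ↔ (n = PySem.Int.mod i 5 + 1) := by
  rw [PySem.Int.mod_eq_emod_of_pos (by omega)]
  have h0 : 0 ≤ i % 5 := Int.emod_nonneg i (by omega)
  have h5 : i % 5 < 5 := Int.emod_lt_of_pos i (by omega)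
  set r := i % 5 with hr
  clear_value r
  interval_cases r <;> simp [PySem.List.pyGetD] <;> omega

theorem cond2 (i n : Int) :
    (PySem.List.pyGetD [2, 1, 2, 3, 2, 4, 2, 5] (PySem.Int.mod i 8) 0 = n) ↔
      ((PySem.Int.mod i 2 = 0 ∧ n = 2) ∨
       (¬(PySem.Int.mod i 2 = 0 ∧ n = 2) ∧ PySem.Int.mod i 2 ≠ 0 ∧
        PySem.List.pyGetD twoA (PySem.Int.floordiv (PySem.Int.mod i 8) 2) 0 = n)) := by
  rw [PySem.Int.mod_eq_emod_of_pos (show (0:Int) < 8 by omega),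
      PySem.Int.mod_eq_emod_of_pos (show (0:Int) < 2 by omega),
      PySem.Int.floordiv_eq_ediv_of_pos (show (0:Int) < 2 by omega)]
  have h2 : i % 2 = (i % 8) % 2 := by omega
  rw [h2]
  have h0 : 0 ≤ i % 8 := Int.emod_nonneg i (by omega)
  have h8 : i % 8 < 8 := Int.emod_lt_of_pos i (by omega)
  set r := i % 8 with hr
  clear_value r
  interval_cases r <;> simp [PySem.List.pyGetD, twoA] <;> omega

theorem cond3 (i n : Int) :
    (PySem.List.pyGetD [3, 3, 1, 1, 2, 2, 4, 4, 5, 5] (PySem.Int.mod i 10) 0 = n) ↔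
      (n = PySem.List.pyGetD threeA (PySem.Int.floordiv (PySem.Int.mod i 10) 2) 0) := by
  rw [PySem.Int.mod_eq_emod_of_pos (show (0:Int) < 10 by omega),
      PySem.Int.floordiv_eq_ediv_of_pos (show (0:Int) < 2 by omega)]
  have h0 : 0 ≤ i % 10 := Int.emod_nonneg i (by omega)
  have h10 : i % 10 < 10 := Int.emod_lt_of_pos i (by omega)
  set r := i % 10 with hr
  clear_value r
  interval_cases r <;> simp [PySem.List.pyGetD, threeA] <;> omega

-- A's single fold computes the three pattern counts componentwise
theorem fold_eq (l : List Int) : ∀ (s t0 t1 t2 : Int),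
    (PySem.List.enumerate l s).foldl
      (fun (t : Int × Int × Int) (p : Int × Int) =>
        let i := p.1
        let n := p.2
        let t0 := if n = PySem.Int.mod i 5 + 1 then t.1 + 1 else t.1
        let t1 :=
          if PySem.Int.mod i 2 = 0 ∧ n = 2 then t.2.1 + 1
          else if PySem.Int.mod i 2 ≠ 0 ∧
                  PySem.List.pyGetD twoA (PySem.Int.floordiv (PySem.Int.mod i 8) 2) 0 = n
               then t.2.1 + 1 else t.2.1
        let t2 :=
          if n = PySem.List.pyGetD threeA (PySem.Int.floordiv (PySem.Int.mod i 10) 2) 0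
          then t.2.2 + 1 else t.2.2
        (t0, t1, t2)) (t0, t1, t2)
    = ((PySem.List.enumerate l s).foldl
         (fun c q => if PySem.List.pyGetD [1,2,3,4,5] (PySem.Int.mod q.1 5) 0 = q.2 then c + 1 else c) t0,
       (PySem.List.enumerate l s).foldl
         (fun c q => if PySem.List.pyGetD [2,1,2,3,2,4,2,5] (PySem.Int.mod q.1 8) 0 = q.2 then c + 1 else c) t1,
       (PySem.List.enumerate l s).foldl
         (fun c q => if PySem.List.pyGetD [3,3,1,1,2,2,4,4,5,5] (PySem.Int.mod q.1 10) 0 = q.2 then c + 1 else c) t2) := by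
  induction l with
  | nil => intro s t0 t1 t2; simp [PySem.List.enumerate_nil]
  | cons x xs ih =>
      intro s t0 t1 t2
      rw [PySem.List.enumerate_cons]
      simp only [List.foldl_cons]
      rw [ih]
      congr 1
      · congr 1
        simp only [cond1]
      congr 1
      · congr 1
        simp only [cond2]
        split_ifs <;> first | rfl | tauto
      · congr 1
        simp only [cond3]

-- ===== VERDICT (by name: the statement is the Claim_ definition above) =====
theorem solution_spec : Claim_equal_solution := by
  intro answers _
  unfold Spec_solution solution solution_alt pvPatterns pvCount
  simp only [List.map_cons, List.map_nil, PySem.List.len_eq]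
  rw [fold_eq]
  rfl
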